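-- pv_equiv track=rewrite | github.com/glouno/Courseworks | PRP Programming Practice/Coursework1.py | same_line
-- ===== SOURCE A (Python) =====
-- def same_line(network, station1, station2):
--     for line in network:    #selects the tuples in the network
--         flag1 = False   #flags to check if each station is in the line
--         flag2 = False
--         for tube in line:   #selects the elements inside the tuple
--             if type(tube) == str:   #index 0 of the tuple is the name of the tube line so we avoid it and focus on the stations
--                 pass
--             else:                   #index 1 of the tuple is a list of the tube stations which is what we focus on
--                 for station in tube:    #we check for each station in the line if they are the same as the two station given
--                     if station == station1:
--                         flag1 = True
--                     elif station == station2: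
--                         flag2 = True
--
--                 if flag1 and flag2 == True: #if both station are in this line, True
--                     return True
--                 else:                       #we go back to the loop to check for the other lines in the network
--                     pass
--
--     return False    #if none of the lines have worked, False
-- ===== SOURCE B (Python) =====
-- def same_line(network, station1, station2):
--     # Build once: station -> set of line indices containing it; then answer by set intersection.
--     index = {}
--     for i, line in enumerate(network):
--         for tube in line:
--             if type(tube) == str:
--                 pass
--             else:
--                 for station in tube:
--                     index.setdefault(station, set()).add(i)
--     return station1 != station2 and bool(index.get(station1, set()) & index.get(station2, set()))
-- ===== Notes on version B (the rewrite author's own statement) =====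
-- stated objective: alternative
-- what changed: Replaces the per-line two-flag scanning loop with a single pass that builds a station-to-line-index table and answers by intersecting the two stations' index sets (with the same station1==station2 -> False behaviour that A's elif yields).
import Mathlib
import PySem

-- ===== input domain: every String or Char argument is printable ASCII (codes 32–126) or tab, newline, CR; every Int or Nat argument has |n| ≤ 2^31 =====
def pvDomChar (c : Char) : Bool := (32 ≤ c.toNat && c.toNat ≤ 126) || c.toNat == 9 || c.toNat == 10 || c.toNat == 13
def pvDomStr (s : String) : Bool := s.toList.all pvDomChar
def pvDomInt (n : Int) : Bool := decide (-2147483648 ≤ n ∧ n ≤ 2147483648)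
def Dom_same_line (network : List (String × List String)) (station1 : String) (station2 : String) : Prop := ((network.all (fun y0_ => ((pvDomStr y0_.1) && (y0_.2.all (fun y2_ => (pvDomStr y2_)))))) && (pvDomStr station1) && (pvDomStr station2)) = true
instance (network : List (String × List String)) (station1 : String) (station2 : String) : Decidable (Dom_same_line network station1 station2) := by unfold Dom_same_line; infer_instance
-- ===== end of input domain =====

-- B replaces A's per-line two-flag scan by one indexing pass (station → set of line indices) plus a set intersection; same cost, different structure.

-- ===== PORT A =====
-- Each 'line' is a pair (name, stations); the inner 'for tube in line' skips the
-- string element (type(tube) == str) and scans the station list, keeping two flags;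
-- 'flag1 and flag2 == True' is flag1 && flag2.
def same_line (network : List (String × List String)) (station1 : String) (station2 : String) : Bool :=
  match network with
  | [] => false
  | line :: rest =>
    let flags := line.2.foldl (fun (f : Bool × Bool) station =>
        if station = station1 then (true, f.2)
        else if station = station2 then (f.1, true)
        else f) (false, false)
    if flags.1 && flags.2 then true
    else same_line rest station1 station2

-- ===== PORT B =====
-- index.setdefault(station, set()).add(i) is d.modify station ∅ (·.add i);
-- the 'for tube in line' again skips the name and reads the station list (p.2.2).
def same_line_alt (network : List (String × List String)) (station1 : String) (station2 : String) : Bool :=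
  let index : PySem.Dict String (PySem.Set Int) :=
    (PySem.List.enumerate network).foldl
      (fun d p => p.2.2.foldl
        (fun d station => d.modify station PySem.Set.empty (fun s => s.add p.1)) d)
      PySem.Dict.empty
  station1 != station2 &&
    !(PySem.Set.inter (index.getD station1 PySem.Set.empty) (index.getD station2 PySem.Set.empty)).isEmpty

-- ===== PRECONDITION & SPEC =====
def Spec_same_line (network : List (String × List String)) (station1 : String) (station2 : String) (out : Bool) : Prop := out = same_line_alt network station1 station2
instance (network : List (String × List String)) (station1 : String) (station2 : String) (out : Bool) : Decidable (Spec_same_line network station1 station2 out) := by unfold Spec_same_line; infer_instance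

-- ===== CLAIM (what is proved, stated in full; the proofs are below) =====
def Claim_equal_same_line : Prop := ∀ (network : List (String × List String)) (station1 : String) (station2 : String), Dom_same_line network station1 station2 → Spec_same_line network station1 station2 (same_line network station1 station2)

-- ===== LEMMAS AND PROOFS =====

-- A's inner flag loop: first flag records station1 ∈ xs, second records station2 ∈ xs with station2 ≠ station1 (the elif).
theorem flags_fold (station1 station2 : String) (xs : List String) (f1 f2 : Bool) :
    xs.foldl (fun (f : Bool × Bool) station =>
        if station = station1 then (true, f.2)
        else if station = station2 then (f.1, true)
        else f) (f1, f2)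
      = (f1 || decide (station1 ∈ xs), f2 || (decide (station2 ∈ xs) && decide (station2 ≠ station1))) := by
  induction xs generalizing f1 f2 with
  | nil => simp
  | cons x xs ih =>
    simp only [List.foldl_cons]
    by_cases h1 : x = station1
    · subst h1
      rw [if_pos rfl, ih]
      by_cases h2 : station2 = x
      · simp [h2]
      · simp [List.mem_cons, h2]
    · rw [if_neg h1]
      by_cases h2 : x = station2
      · subst h2
        rw [if_pos rfl, ih]
        simp [List.mem_cons, Ne.symm h1, h1]
      · rw [if_neg h2, ih]
        simp [List.mem_cons, Ne.symm h1, Ne.symm h2]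

-- characterisation of A
theorem same_line_iff (network : List (String × List String)) (station1 station2 : String) :
    same_line network station1 station2 = true ↔
      ∃ line ∈ network, station1 ∈ line.2 ∧ station2 ∈ line.2 ∧ station2 ≠ station1 := by
  induction network with
  | nil => simp [same_line]
  | cons line rest ih =>
    rw [same_line]
    simp only [flags_fold]
    by_cases hcond : (station1 ∈ line.2) ∧ (station2 ∈ line.2) ∧ station2 ≠ station1
    · obtain ⟨ha, hb, hc⟩ := hcond
      simp [ha, hb, hc]
    · have : ((false || decide (station1 ∈ line.2)) &&
          (false || (decide (station2 ∈ line.2) && decide (station2 ≠ station1)))) = false := by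
        by_cases ha : station1 ∈ line.2 <;> by_cases hb : station2 ∈ line.2 <;>
          by_cases hc : station2 = station1 <;> simp_all
      rw [this, if_neg (by simp), ih]
      constructor
      · rintro ⟨l, hl, h⟩; exact ⟨l, List.mem_cons_of_mem _ hl, h⟩
      · rintro ⟨l, hl, h⟩
        rcases List.mem_cons.mp hl with rfl | hl
        · exact absurd h hcond
        · exact ⟨l, hl, h⟩

-- B's inner loop over one line's station list
theorem inner_fold_mem (xs : List String) (d : PySem.Dict String (PySem.Set Int))
    (i : Int) (st : String) (j : Int) :
    j ∈ (xs.foldl (fun d station => d.modify station PySem.Set.empty (fun s => s.add i)) d).getD st PySem.Set.empty ↔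
      j ∈ d.getD st PySem.Set.empty ∨ (j = i ∧ st ∈ xs) := by
  induction xs generalizing d with
  | nil => simp
  | cons x xs ih =>
    simp only [List.foldl_cons, ih, PySem.Dict.getD_modify]
    by_cases h : st = x
    · subst h
      simp [PySem.Set.mem_add]
      tauto
    · simp [h, List.mem_cons]

-- B's outer loop over the enumerated network
theorem outer_fold_mem (l : List (Int × (String × List String)))
    (d : PySem.Dict String (PySem.Set Int)) (st : String) (j : Int) :
    j ∈ (l.foldl (fun d p => p.2.2.foldl
          (fun d station => d.modify station PySem.Set.empty (fun s => s.add p.1)) d) d).getD st PySem.Set.empty ↔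
      j ∈ d.getD st PySem.Set.empty ∨ ∃ p ∈ l, p.1 = j ∧ st ∈ p.2.2 := by
  induction l generalizing d with
  | nil => simp
  | cons p l ih =>
    simp only [List.foldl_cons, ih, inner_fold_mem, List.mem_cons]
    constructor
    · rintro (((h | ⟨rfl, hm⟩) | ⟨q, hq, h⟩))
      · exact Or.inl h
      · exact Or.inr ⟨p, Or.inl rfl, rfl, hm⟩
      · exact Or.inr ⟨q, Or.inr hq, h⟩
    · rintro (h | ⟨q, (rfl | hq), hj, hm⟩)
      · exact Or.inl (Or.inl h)
      · exact Or.inl (Or.inr ⟨hj.symm, hm⟩)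
      · exact Or.inr ⟨q, hq, hj, hm⟩

-- membership in enumerate
theorem mem_enumerate_iff {α : Type} (l : List α) (start : Int) (p : Int × α) :
    p ∈ PySem.List.enumerate l start ↔ ∃ i : Nat, p.1 = start + i ∧ l[i]? = some p.2 := by
  induction l generalizing start with
  | nil => simp [PySem.List.enumerate]
  | cons x xs ih =>
    rw [PySem.List.enumerate]
    simp only [List.mem_cons, ih]
    constructor
    · rintro (rfl | ⟨i, hi, hg⟩)
      · exact ⟨0, by simp⟩
      · exact ⟨i + 1, by push_cast; omega, by simpa using hg⟩
    · rintro ⟨i, hi, hg⟩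
      cases i with
      | zero =>
        left
        obtain ⟨a, b⟩ := p
        simp at hg hi
        simp_all
      | succ i =>
        right
        exact ⟨i, by push_cast at hi ⊢; omega, by simpa using hg⟩

-- characterisation of B
theorem same_line_alt_iff (network : List (String × List String)) (station1 station2 : String) :
    same_line_alt network station1 station2 = true ↔
      station1 ≠ station2 ∧ ∃ line ∈ network, station1 ∈ line.2 ∧ station2 ∈ line.2 := by
  unfold same_line_alt
  simp only [Bool.and_eq_true, bne_iff_ne, Bool.not_eq_true', List.isEmpty_eq_false_iff,
    ne_eq]
  constructor
  · rintro ⟨hne, hn⟩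
    refine ⟨hne, ?_⟩
    obtain ⟨j, hj⟩ := List.exists_mem_of_ne_nil _ hn
    rw [PySem.Set.mem_inter] at hj
    obtain ⟨h1, h2⟩ := hj
    rw [outer_fold_mem] at h1 h2
    rcases h1 with h1 | ⟨p, hp, hpj, hps⟩
    · simp [PySem.Dict.getD_empty, PySem.Set.empty] at h1
    rcases h2 with h2 | ⟨q, hq, hqj, hqs⟩
    · simp [PySem.Dict.getD_empty, PySem.Set.empty] at h2
    rw [mem_enumerate_iff] at hp hq
    obtain ⟨i, hpi, hpg⟩ := hp
    obtain ⟨i', hqi, hqg⟩ := hq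
    have hii : i = i' := by omega
    subst hii
    have : p.2 = q.2 := by rw [hpg] at hqg; exact (Option.some.injEq _ _).mp hqg
    refine ⟨p.2, ?_, hps, this ▸ hqs⟩
    exact List.mem_of_getElem? hpg
  · rintro ⟨hne, line, hl, h1, h2⟩
    refine ⟨hne, ?_⟩
    obtain ⟨i, hi, hg⟩ := List.mem_iff_getElem.mp hl
    apply List.ne_nil_of_mem (a := (i : Int))
    rw [PySem.Set.mem_inter, outer_fold_mem, outer_fold_mem]
    have hmem : ((i : Int), line) ∈ PySem.List.enumerate network 0 := by
      rw [mem_enumerate_iff]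
      exact ⟨i, by simp, by simp [hg, List.getElem?_eq_getElem hi]⟩
    exact ⟨Or.inr ⟨((i : Int), line), hmem, rfl, h1⟩, Or.inr ⟨((i : Int), line), hmem, rfl, h2⟩⟩

-- ===== VERDICT (by name: the statement is the Claim_ definition above) =====
theorem same_line_spec : Claim_equal_same_line := by
  intro network station1 station2 _
  unfold Spec_same_line
  rw [Bool.eq_iff_iff, same_line_iff, same_line_alt_iff]
  constructor
  · rintro ⟨l, hl, ha, hb, hc⟩
    exact ⟨Ne.symm hc, l, hl, ha, hb⟩
  · rintro ⟨hne, l, hl, ha, hb⟩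
    exact ⟨l, hl, ha, hb, Ne.symm hne⟩
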